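-- pv_equiv track=rewrite | github.com/alex-903/zsh-mouse-and-flex-search | zsh_syntax_highlighting.py | _scan_quoted
-- ===== SOURCE A (Python) =====
-- def _scan_quoted(text: str, start: int, quote: str) -> int:
--     i = start + 1
--     while i < len(text):
--         ch = text[i]
--         if quote != "'" and ch == "\\" and i + 1 < len(text):
--             i += 2
--             continue
--         if ch == quote:
--             return i + 1
--         i += 1
--     # Incomplete quote while typing is not necessarily an error;
--     # keep highlighting the rest as a string.
--     return len(text)
-- ===== SOURCE B (Python) =====
-- def _scan_quoted(text: str, start: int, quote: str) -> int:
--     n = len(text)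
--     i = start + 1
--     if quote == "'":
--         # single quotes honour no escapes: one substring search does it
--         j = text[i:].find("'")
--         return n if j < 0 else i + j + 1
--     if len(quote) != 1 or quote == "\\":
--         # a multi-char (or empty) quote never equals a single character, and a
--         # backslash quote is always consumed as an escape: the scan runs to the end
--         return n
--     while i < n:
--         seg = text[i:]
--         jq = seg.find(quote)
--         if jq < 0:
--             return n
--         jb = seg[:jq].find("\\")
--         if jb < 0:
--             return i + jq + 1
--         i += jb + 2
--     return n
-- ===== Notes on version B (the rewrite author's own statement) =====
-- stated objective: faster
-- what changed: Replaces A's per-character interpreted while loop with substring searches: a single str.find for the no-escape single-quote case, O(1) closed-form answers for multi-char/empty and backslash quotes (which can never close a string), and otherwise a jump scan that repeatedly finds the next quote and the first backslash before it with C-level str.find instead of stepping one character at a time.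
-- outside the precondition, e.g. on _scan_quoted("'a", -2, "'"): A returns 1, B returns 2
import Mathlib
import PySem

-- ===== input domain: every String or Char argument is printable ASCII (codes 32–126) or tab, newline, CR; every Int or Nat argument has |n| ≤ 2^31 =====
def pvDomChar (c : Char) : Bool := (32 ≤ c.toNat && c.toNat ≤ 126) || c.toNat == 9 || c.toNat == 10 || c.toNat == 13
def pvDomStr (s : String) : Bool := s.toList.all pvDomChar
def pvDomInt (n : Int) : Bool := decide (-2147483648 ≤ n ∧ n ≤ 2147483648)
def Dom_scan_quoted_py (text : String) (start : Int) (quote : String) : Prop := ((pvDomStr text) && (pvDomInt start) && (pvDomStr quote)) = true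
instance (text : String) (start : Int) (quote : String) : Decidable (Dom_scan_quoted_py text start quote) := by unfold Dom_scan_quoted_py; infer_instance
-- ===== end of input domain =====

-- B replaces A's per-character while loop by substring (find) searches with closed forms for
-- degenerate quotes; equivalence is proved for start ≥ -1 (the natural domain: Python's
-- negative indexing makes A raise or wrap around for smaller starts).


-- ===== PORT A =====
-- A's while loop; `ch == quote` compares the 1-char string text[i] with quote, ported as
-- [ch] = quote.toList.  pyGet? none = IndexError (only reachable for i < -len, outside Pre_).
def scanAGo (cs : List Char) (quote : String) (i : Int) : Int :=
  if _h : i < (cs.length : Int) then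
    match PySem.List.pyGet? cs i with
    | none => 0  -- Python raises IndexError here; outside Pre_
    | some ch =>
      if quote ≠ "'" ∧ ch = '\\' ∧ i + 1 < (cs.length : Int) then
        scanAGo cs quote (i + 2)
      else if [ch] = quote.toList then
        i + 1
      else
        scanAGo cs quote (i + 1)
  else (cs.length : Int)
termination_by ((cs.length : Int) - i).toNat
decreasing_by all_goals omega

def scan_quoted_py (text : String) (start : Int) (quote : String) : Int :=
  scanAGo text.toList quote (start + 1)

-- ===== PORT B =====
-- B's jump-scan loop: find the next quote in text[i:], and the first backslash before it.
-- (Source B's locals seg/jq/jb are inlined: Lean's `let` obstructs the termination proof)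
def scanBGo (cs : List Char) (q : List Char) (i : Int) : Int :=
  if _h : i < (cs.length : Int) then
    if PySem.Chars.find (PySem.List.slice cs (some i) none) q < 0 then (cs.length : Int)
    else
      if _hb : PySem.Chars.find (PySem.List.slice (PySem.List.slice cs (some i) none) none
          (some (PySem.Chars.find (PySem.List.slice cs (some i) none) q))) ['\\'] < 0 then
        i + PySem.Chars.find (PySem.List.slice cs (some i) none) q + 1
      else
        scanBGo cs q (i + PySem.Chars.find (PySem.List.slice (PySem.List.slice cs (some i) none) none
          (some (PySem.Chars.find (PySem.List.slice cs (some i) none) q))) ['\\'] + 2)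
  else (cs.length : Int)
termination_by ((cs.length : Int) - i).toNat
decreasing_by omega

def scan_quoted_py_alt (text : String) (start : Int) (quote : String) : Int :=
  let n : Int := (text.toList.length : Int)
  let i := start + 1
  if quote = "'" then
    let j := PySem.Chars.find (PySem.List.slice text.toList (some i) none) ['\'']
    if j < 0 then n else i + j + 1
  else if quote.toList.length ≠ 1 ∨ quote = "\\" then n
  else scanBGo text.toList quote.toList i

-- ===== PRECONDITION & SPEC =====
-- Pre_ restricts to the natural domain start ≥ -1 (start is the index of the opening quote).
-- For start < -1 Python A either raises IndexError (start+1 < -len) or scans through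
-- negative-index wraparound, an accident of A's indexing that B does not reproduce.
def Pre_scan_quoted_py (text : String) (start : Int) (quote : String) : Prop := -1 ≤ start
instance (text : String) (start : Int) (quote : String) : Decidable (Pre_scan_quoted_py text start quote) := by unfold Pre_scan_quoted_py; infer_instance
def pvWitness_scan_quoted_py : String × Int × String := ("a'", 0, "'")

def Spec_scan_quoted_py (text : String) (start : Int) (quote : String) (out : Int) : Prop := out = scan_quoted_py_alt text start quote
instance (text : String) (start : Int) (quote : String) (out : Int) : Decidable (Spec_scan_quoted_py text start quote out) := by unfold Spec_scan_quoted_py; infer_instance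

-- ===== CLAIM (what is proved, stated in full; the proofs are below) =====
def Claim_equal_scan_quoted_py : Prop := ∀ (text : String) (start : Int) (quote : String), Dom_scan_quoted_py text start quote → Pre_scan_quoted_py text start quote → Spec_scan_quoted_py text start quote (scan_quoted_py text start quote)

-- ===== LEMMAS AND PROOFS =====
theorem singleton_prefix_iff (a : Char) (l : List Char) : [a] <+: l ↔ l.head? = some a := by
  cases l <;> simp [List.cons_prefix_cons, eq_comm]
theorem infix_singleton_iff (a : Char) (l : List Char) : [a] <:+: l ↔ a ∈ l := by
  constructor
  · intro h; exact h.mem (by simp)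
  · intro h
    obtain ⟨s, t, rfl⟩ := List.append_of_mem h
    exact ⟨s, t, by simp⟩
theorem find_single_neg_one_iff (a : Char) (l : List Char) :
    PySem.Chars.find l [a] = -1 ↔ a ∉ l := by
  rw [PySem.Chars.find_eq_neg_one_iff, infix_singleton_iff]
theorem find_nil_single (a : Char) : PySem.Chars.find [] [a] = -1 := by
  rw [find_single_neg_one_iff]; simp
theorem mem_of_find_nonneg (a : Char) (l : List Char) (h : 0 ≤ PySem.Chars.find l [a]) :
    a ∈ l := by
  rw [← infix_singleton_iff]
  exact (PySem.Chars.find_nonneg_iff l [a]).mp h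
theorem prefix_drop_iff (a : Char) (l : List Char) (j : Nat) :
    [a] <+: l.drop j ↔ l[j]? = some a := by
  rw [singleton_prefix_iff, List.head?_drop]
theorem find_cons_self (a : Char) (l : List Char) : PySem.Chars.find (a :: l) [a] = 0 := by
  have h0 : 0 ≤ PySem.Chars.find (a :: l) [a] :=
    (PySem.Chars.find_nonneg_iff _ _).mpr ((infix_singleton_iff _ _).mpr (by simp))
  obtain ⟨hpre, hmin⟩ := PySem.Chars.find_spec h0
  by_contra hne
  have hpos : 0 < (PySem.Chars.find (a :: l) [a]).toNat := by omega
  exact hmin 0 hpos (by rw [prefix_drop_iff]; simp)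
theorem find_cons_ne (a c : Char) (l : List Char) (h : c ≠ a) :
    PySem.Chars.find (c :: l) [a] =
      if PySem.Chars.find l [a] = -1 then -1 else PySem.Chars.find l [a] + 1 := by
  by_cases hn : PySem.Chars.find l [a] = -1
  · rw [if_pos hn, find_single_neg_one_iff]
    have hnm := (find_single_neg_one_iff a l).mp hn
    simp only [List.mem_cons, hnm, or_false]
    exact fun hh => h hh.symm
  · rw [if_neg hn]
    have h0 : 0 ≤ PySem.Chars.find l [a] := by
      have := PySem.Chars.neg_one_le_find l [a]; omega
    obtain ⟨hpre, hmin⟩ := PySem.Chars.find_spec h0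
    have hmem : a ∈ l := by
      rw [prefix_drop_iff] at hpre
      exact List.mem_of_getElem? hpre
    have h0' : 0 ≤ PySem.Chars.find (c :: l) [a] :=
      (PySem.Chars.find_nonneg_iff _ _).mpr ((infix_singleton_iff _ _).mpr (by simp [hmem]))
    obtain ⟨hpre', hmin'⟩ := PySem.Chars.find_spec h0'
    set t := (PySem.Chars.find l [a]).toNat with ht
    set t' := (PySem.Chars.find (c :: l) [a]).toNat with ht'
    have hub : t' ≤ t + 1 := by
      by_contra hgt
      exact hmin' (t + 1) (by omega) (by rw [prefix_drop_iff]; simpa [prefix_drop_iff] using hpre)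
    have hne0 : t' ≠ 0 := by
      intro h0''
      rw [h0'', prefix_drop_iff] at hpre'
      simp at hpre'
      exact h hpre'
    have hlb : t + 1 ≤ t' := by
      by_contra hlt
      have : t' - 1 < t := by omega
      refine hmin (t' - 1) this ?_
      rw [prefix_drop_iff]
      rw [prefix_drop_iff] at hpre'
      obtain ⟨u, hu⟩ := Nat.exists_eq_succ_of_ne_zero hne0
      have : (c :: l)[t']? = l[t' - 1]? := by
        rw [hu]; simp
      rwa [this] at hpre'
    omega
theorem scanAGo_stop (cs : List Char) (quote : String) (i : Int)
    (h : ¬ i < (cs.length : Int)) : scanAGo cs quote i = (cs.length : Int) := by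
  rw [scanAGo, dif_neg h]

theorem scanAGo_eq (cs : List Char) (quote : String) (i : Int) (c : Char)
    (hlt : i < (cs.length : Int)) (hc : PySem.List.pyGet? cs i = some c) :
    scanAGo cs quote i =
      if quote ≠ "'" ∧ c = '\\' ∧ i + 1 < (cs.length : Int) then scanAGo cs quote (i + 2)
      else if [c] = quote.toList then i + 1
      else scanAGo cs quote (i + 1) := by
  rw [scanAGo, dif_pos hlt, hc]

theorem scanBGo_stop (cs : List Char) (q : List Char) (i : Int)
    (h : ¬ i < (cs.length : Int)) : scanBGo cs q i = (cs.length : Int) := by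
  rw [scanBGo, dif_neg h]

theorem scanBGo_eq (cs : List Char) (a : Char) (i : Int) (h0 : 0 ≤ i)
    (hlt : i < (cs.length : Int)) :
    scanBGo cs [a] i =
      if PySem.Chars.find (cs.drop i.toNat) [a] = -1 then (cs.length : Int)
      else if PySem.Chars.find ((cs.drop i.toNat).take (PySem.Chars.find (cs.drop i.toNat) [a]).toNat) ['\\'] = -1
        then i + PySem.Chars.find (cs.drop i.toNat) [a] + 1
        else scanBGo cs [a] (i + PySem.Chars.find ((cs.drop i.toNat).take (PySem.Chars.find (cs.drop i.toNat) [a]).toNat) ['\\'] + 2) := by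
  rw [scanBGo, dif_pos hlt, PySem.List.slice_from cs h0]
  by_cases hn : PySem.Chars.find (cs.drop i.toNat) [a] = -1
  · rw [if_pos hn, if_pos (by omega : PySem.Chars.find (cs.drop i.toNat) [a] < 0)]
  · have hge : 0 ≤ PySem.Chars.find (cs.drop i.toNat) [a] := by
      have := PySem.Chars.neg_one_le_find (cs.drop i.toNat) [a]; omega
    rw [if_neg hn, if_neg (by omega : ¬ PySem.Chars.find (cs.drop i.toNat) [a] < 0),
        PySem.List.slice_to _ hge]
    by_cases hb : PySem.Chars.find ((cs.drop i.toNat).take (PySem.Chars.find (cs.drop i.toNat) [a]).toNat) ['\\'] = -1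
    · rw [if_pos hb, dif_pos (by omega : PySem.Chars.find ((cs.drop i.toNat).take (PySem.Chars.find (cs.drop i.toNat) [a]).toNat) ['\\'] < 0)]
    · have hge' : 0 ≤ PySem.Chars.find ((cs.drop i.toNat).take (PySem.Chars.find (cs.drop i.toNat) [a]).toNat) ['\\'] := by
        have := PySem.Chars.neg_one_le_find ((cs.drop i.toNat).take (PySem.Chars.find (cs.drop i.toNat) [a]).toNat) ['\\']; omega
      rw [if_neg hb, dif_neg (by omega : ¬ PySem.Chars.find ((cs.drop i.toNat).take (PySem.Chars.find (cs.drop i.toNat) [a]).toNat) ['\\'] < 0)]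

theorem scanBGo_none (cs : List Char) (a : Char) (i : Int) (h0 : 0 ≤ i)
    (hmem : a ∉ cs.drop i.toNat) : scanBGo cs [a] i = (cs.length : Int) := by
  by_cases hlt : i < (cs.length : Int)
  · rw [scanBGo_eq cs a i h0 hlt, if_pos ((find_single_neg_one_iff _ _).mpr hmem)]
  · exact scanBGo_stop cs [a] i hlt

theorem L_noesc (cs : List Char) : ∀ (m : Nat) (i : Int), 0 ≤ i →
    ((cs.length : Int) - i).toNat ≤ m →
    scanAGo cs "'" i =
      (if PySem.Chars.find (cs.drop i.toNat) ['\''] < 0 then (cs.length : Int)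
       else i + PySem.Chars.find (cs.drop i.toNat) ['\''] + 1) := by
  intro m
  induction m with
  | zero =>
    intro i h0 hm
    have hlt : ¬ i < (cs.length : Int) := by omega
    have hdrop : cs.drop i.toNat = [] := List.drop_eq_nil_of_le (by omega)
    rw [scanAGo_stop _ _ _ hlt, hdrop, if_pos (by rw [find_nil_single]; omega)]
  | succ m ih =>
    intro i h0 hm
    by_cases hlt : i < (cs.length : Int)
    · have htl : i.toNat < cs.length := by omega
      have hc : PySem.List.pyGet? cs i = some cs[i.toNat] :=
        PySem.List.pyGet?_eq_some_getElem cs h0 hlt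
      have hdrop : cs.drop i.toNat = cs[i.toNat] :: cs.drop (i.toNat + 1) :=
        List.drop_eq_getElem_cons htl
      rw [scanAGo_eq cs "'" i cs[i.toNat] hlt hc, if_neg (by simp)]
      by_cases hcq : cs[i.toNat] = '\''
      · rw [if_pos (by rw [hcq]; decide), hdrop, hcq, find_cons_self]
        rw [if_neg (by omega)]
        omega
      · rw [if_neg (by simp [hcq])]
        rw [ih (i + 1) (by omega) (by omega)]
        rw [(show ((i + 1 : Int)).toNat = i.toNat + 1 from by omega)]
        rw [hdrop, find_cons_ne '\'' cs[i.toNat] _ hcq]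
        have hge := PySem.Chars.neg_one_le_find (cs.drop (i.toNat + 1)) ['\'']
        split_ifs <;> omega
    · have hdrop : cs.drop i.toNat = [] := List.drop_eq_nil_of_le (by omega)
      rw [scanAGo_stop _ _ _ hlt, hdrop, if_pos (by rw [find_nil_single]; omega)]

theorem L_len (cs : List Char) (quote : String) (hq : quote.toList.length ≠ 1) :
    ∀ (m : Nat) (i : Int), 0 ≤ i → ((cs.length : Int) - i).toNat ≤ m →
    scanAGo cs quote i = (cs.length : Int) := by
  intro m
  induction m with
  | zero =>
    intro i h0 hm
    exact scanAGo_stop _ _ _ (by omega)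
  | succ m ih =>
    intro i h0 hm
    by_cases hlt : i < (cs.length : Int)
    · have htl : i.toNat < cs.length := by omega
      have hc : PySem.List.pyGet? cs i = some cs[i.toNat] :=
        PySem.List.pyGet?_eq_some_getElem cs h0 hlt
      rw [scanAGo_eq cs quote i _ hlt hc]
      by_cases hcond : quote ≠ "'" ∧ cs[i.toNat] = '\\' ∧ i + 1 < (cs.length : Int)
      · rw [if_pos hcond]; exact ih (i + 2) (by omega) (by omega)
      · rw [if_neg hcond, if_neg (by intro h; apply hq; rw [← h]; rfl)]
        exact ih (i + 1) (by omega) (by omega)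
    · exact scanAGo_stop _ _ _ hlt

theorem L_bs (cs : List Char) : ∀ (m : Nat) (i : Int), 0 ≤ i →
    ((cs.length : Int) - i).toNat ≤ m → scanAGo cs "\\" i = (cs.length : Int) := by
  intro m
  induction m with
  | zero =>
    intro i h0 hm
    exact scanAGo_stop _ _ _ (by omega)
  | succ m ih =>
    intro i h0 hm
    by_cases hlt : i < (cs.length : Int)
    · have htl : i.toNat < cs.length := by omega
      have hc : PySem.List.pyGet? cs i = some cs[i.toNat] :=
        PySem.List.pyGet?_eq_some_getElem cs h0 hlt
      rw [scanAGo_eq cs "\\" i _ hlt hc]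
      by_cases hcond : cs[i.toNat] = '\\' ∧ i + 1 < (cs.length : Int)
      · rw [if_pos ⟨by decide, hcond.1, hcond.2⟩]
        exact ih (i + 2) (by omega) (by omega)
      · rw [if_neg (fun h => hcond ⟨h.2.1, h.2.2⟩)]
        by_cases hbs : cs[i.toNat] = '\\'
        · rw [if_pos (by rw [hbs]; decide)]
          have : ¬ i + 1 < (cs.length : Int) := fun h => hcond ⟨hbs, h⟩
          omega
        · rw [if_neg (by simp [hbs])]
          exact ih (i + 1) (by omega) (by omega)
    · exact scanAGo_stop _ _ _ hlt

theorem L_main (cs : List Char) (quote : String) (q : Char) (hq : quote.toList = [q])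
    (hq1 : q ≠ '\'') (hq2 : q ≠ '\\') : ∀ (m : Nat) (i : Int), 0 ≤ i →
    ((cs.length : Int) - i).toNat ≤ m → scanAGo cs quote i = scanBGo cs [q] i := by
  have hqne : quote ≠ "'" := by
    intro h; subst h
    have hx : ['\''] = [q] := by rw [← hq]; decide
    exact hq1 (List.cons.inj hx).1.symm
  intro m
  induction m with
  | zero =>
    intro i h0 hm
    rw [scanAGo_stop _ _ _ (by omega), scanBGo_stop _ _ _ (by omega)]
  | succ m ih =>
    intro i h0 hm
    by_cases hlt : i < (cs.length : Int)
    · have htl : i.toNat < cs.length := by omega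
      have hc : PySem.List.pyGet? cs i = some cs[i.toNat] :=
        PySem.List.pyGet?_eq_some_getElem cs h0 hlt
      have hdrop : cs.drop i.toNat = cs[i.toNat] :: cs.drop (i.toNat + 1) :=
        List.drop_eq_getElem_cons htl
      rw [scanAGo_eq cs quote i cs[i.toNat] hlt hc, scanBGo_eq cs q i h0 hlt, hdrop]
      by_cases hcq : cs[i.toNat] = q
      · rw [hcq, find_cons_self, if_neg (fun h => hq2 h.2.1), if_pos (by rw [hq]),
            if_neg (by omega), show ((0 : Int)).toNat = 0 from rfl, List.take_zero,
            find_nil_single, if_pos rfl]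
        omega
      · rw [find_cons_ne q cs[i.toNat] _ hcq]
        by_cases hbs : cs[i.toNat] = '\\'
        · by_cases h2 : i + 1 < (cs.length : Int)
          · rw [if_pos ⟨hqne, hbs, h2⟩, ih (i + 2) (by omega) (by omega)]
            by_cases hr : PySem.Chars.find (cs.drop (i.toNat + 1)) [q] = -1
            · rw [if_pos hr, if_pos rfl]
              apply scanBGo_none cs q (i + 2) (by omega)
              intro hmem
              apply (find_single_neg_one_iff q (cs.drop (i.toNat + 1))).mp hr
              have hdd : cs.drop (i + 2).toNat = List.drop 1 (cs.drop (i.toNat + 1)) := by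
                rw [List.drop_drop]
                congr 1
                omega
              exact List.mem_of_mem_drop (hdd ▸ hmem)
            · have hge : 0 ≤ PySem.Chars.find (cs.drop (i.toNat + 1)) [q] := by
                have := PySem.Chars.neg_one_le_find (cs.drop (i.toNat + 1)) [q]; omega
              rw [if_neg hr, if_neg (by omega)]
              rw [show (PySem.Chars.find (cs.drop (i.toNat + 1)) [q] + 1).toNat
                    = (PySem.Chars.find (cs.drop (i.toNat + 1)) [q]).toNat + 1 from by omega]
              rw [hbs, List.take_succ_cons, find_cons_self, if_neg (by omega)]
              rw [(show i + (0 : Int) + 2 = i + 2 from by omega)]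
          · rw [if_neg (fun h => h2 h.2.2),
                if_neg (by rw [hq]; exact fun h => hcq (List.cons.inj h).1),
                scanAGo_stop _ _ _ (by omega : ¬ i + 1 < (cs.length : Int))]
            have hrnil : cs.drop (i.toNat + 1) = [] := List.drop_eq_nil_of_le (by omega)
            rw [hrnil, find_nil_single]
            simp
        · rw [if_neg (fun h => hbs h.2.1),
              if_neg (by rw [hq]; exact fun h => hcq (List.cons.inj h).1),
              ih (i + 1) (by omega) (by omega)]
          by_cases hr : PySem.Chars.find (cs.drop (i.toNat + 1)) [q] = -1
          · rw [if_pos hr, if_pos rfl]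
            exact scanBGo_none cs q (i + 1) (by omega)
              (by rw [(show ((i + 1 : Int)).toNat = i.toNat + 1 from by omega)]
                  exact (find_single_neg_one_iff q _).mp hr)
          · have hge : 0 ≤ PySem.Chars.find (cs.drop (i.toNat + 1)) [q] := by
              have := PySem.Chars.neg_one_le_find (cs.drop (i.toNat + 1)) [q]; omega
            rw [if_neg hr, if_neg (by omega)]
            rw [show (PySem.Chars.find (cs.drop (i.toNat + 1)) [q] + 1).toNat
                  = (PySem.Chars.find (cs.drop (i.toNat + 1)) [q]).toNat + 1 from by omega]
            rw [List.take_succ_cons, find_cons_ne '\\' cs[i.toNat] _ hbs]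
            have hmem : q ∈ cs.drop (i.toNat + 1) := mem_of_find_nonneg q _ hge
            have hlen1 : i.toNat + 1 < cs.length := by
              by_contra hcx
              rw [List.drop_eq_nil_of_le (by omega)] at hmem
              simp at hmem
            rw [scanBGo_eq cs q (i + 1) (by omega) (by omega),
                (show ((i + 1 : Int)).toNat = i.toNat + 1 from by omega), if_neg hr]
            by_cases hb2 : PySem.Chars.find
                ((cs.drop (i.toNat + 1)).take
                  (PySem.Chars.find (cs.drop (i.toNat + 1)) [q]).toNat) ['\\'] = -1
            · rw [if_pos hb2, if_pos hb2]
              omega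
            · have hge2 : 0 ≤ PySem.Chars.find
                  ((cs.drop (i.toNat + 1)).take
                    (PySem.Chars.find (cs.drop (i.toNat + 1)) [q]).toNat) ['\\'] := by
                have := PySem.Chars.neg_one_le_find
                  ((cs.drop (i.toNat + 1)).take
                    (PySem.Chars.find (cs.drop (i.toNat + 1)) [q]).toNat) ['\\']
                omega
              rw [if_neg hb2, if_neg hb2, if_neg (by omega)]
              rw [show i + (PySem.Chars.find
                    ((cs.drop (i.toNat + 1)).take
                      (PySem.Chars.find (cs.drop (i.toNat + 1)) [q]).toNat) ['\\'] + 1) + 2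
                  = i + 1 + PySem.Chars.find
                    ((cs.drop (i.toNat + 1)).take
                      (PySem.Chars.find (cs.drop (i.toNat + 1)) [q]).toNat) ['\\'] + 2 from by omega]
    · rw [scanAGo_stop _ _ _ hlt, scanBGo_stop _ _ _ hlt]

-- ===== VERDICT (by name: the statement is the Claim_ definition above) =====
theorem scan_quoted_py_spec : Claim_equal_scan_quoted_py := by
  intro text start quote _hdom hpre
  unfold Spec_scan_quoted_py scan_quoted_py scan_quoted_py_alt
  have h0 : 0 ≤ start + 1 := by
    unfold Pre_scan_quoted_py at hpre; omega
  simp only []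
  by_cases hq' : quote = "'"
  · subst hq'
    rw [if_pos rfl, PySem.List.slice_from text.toList h0]
    exact L_noesc text.toList (((text.toList.length : Int) - (start + 1)).toNat)
      (start + 1) h0 le_rfl
  · rw [if_neg hq']
    by_cases hlen : quote.toList.length ≠ 1 ∨ quote = "\\"
    · rw [if_pos hlen]
      rcases hlen with h | h
      · exact L_len text.toList quote h _ (start + 1) h0 le_rfl
      · subst h
        exact L_bs text.toList _ (start + 1) h0 le_rfl
    · rw [if_neg hlen]
      have hl1 : quote.toList.length = 1 := by
        by_contra h; exact hlen (Or.inl h)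
      have hl2 : quote ≠ "\\" := fun h => hlen (Or.inr h)
      obtain ⟨qc, hqc⟩ := List.length_eq_one_iff.mp hl1
      have hq1 : qc ≠ '\'' := fun h =>
        hq' (String.toList_inj.mp (by rw [hqc, h]; decide))
      have hq2 : qc ≠ '\\' := fun h =>
        hl2 (String.toList_inj.mp (by rw [hqc, h]; decide))
      rw [hqc]
      exact L_main text.toList quote qc hqc hq1 hq2 _ (start + 1) h0 le_rfl
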